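-- pv_equiv track=rewrite | github.com/cheeesehead/Twitter | bot/content/generator.py | _parse_tweets
-- ===== SOURCE A (Python) =====
-- def _parse_tweets(text: str) -> list[dict]:
--     """Parse Claude's response into tweet dicts with text and optional meme_id."""
--     tweets = []
--     lines = text.strip().split("\n")
--
--     current_text = None
--     current_meme = None
--
--     for line in lines:
--         stripped = line.strip()
--         if not stripped:
--             continue
--
--         # Check for TWEET: prefix (new format)
--         if stripped.upper().startswith("TWEET:"):
--             # Save previous tweet if exists
--             if current_text is not None:
--                 tweets.append({"text": current_text, "meme_id": current_meme, "article_url": None})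
--             current_text = stripped[6:].strip().strip('"').strip("'").strip("`")
--             current_meme = None
--             continue
--
--         # Check for MEME: prefix
--         if stripped.upper().startswith("MEME:"):
--             meme_val = stripped[5:].strip()
--             if meme_val.upper() != "NONE" and meme_val:
--                 current_meme = meme_val.lower()
--             continue
--
--         # If we're collecting a TWEET: block, append continuation lines
--         if current_text is not None:
--             current_text += " " + stripped
--
--     # Save last tweet
--     if current_text is not None:
--         tweets.append({"text": current_text, "meme_id": current_meme, "article_url": None})
--
--     # If no TWEET: format found, fall back to old parsing
--     if not tweets:
--         tweets = _parse_tweets_legacy(text)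
--
--     # Clean up and filter
--     cleaned = []
--     preamble_phrases = ("here are", "here's", "sure,", "sure!", "certainly")
--     for t in tweets:
--         txt = t["text"].strip('"').strip("'").strip("`").strip()
--         if txt and len(txt) > 10:
--             if txt.lower().startswith(preamble_phrases):
--                 continue
--             t["text"] = txt
--             cleaned.append(t)
--
--     return cleaned[:2]
--
-- def _parse_tweets_legacy(text: str) -> list[dict]:
--     """Legacy parser for when Claude doesn't use TWEET:/MEME: format."""
--     tweets = []
--     lines = text.strip().split("\n")
--     current = []
--
--     for line in lines:
--         stripped = line.strip()
--         if stripped and (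
--             stripped.startswith(("1.", "1)", "2.", "2)", "Option 1", "Option 2",
--                 "Tweet 1", "Tweet 2", "**Option", "**Tweet"))
--         ):
--             if current:
--                 tweets.append("\n".join(current).strip())
--                 current = []
--             for prefix in ("**Option 1:**", "**Option 2:**", "**Tweet 1:**", "**Tweet 2:**",
--                            "Option 1:", "Option 2:", "Tweet 1:", "Tweet 2:",
--                            "Option 1.", "Option 2.", "Tweet 1.", "Tweet 2.",
--                            "1)", "2)", "1.", "2."):
--                 if stripped.startswith(prefix):
--                     stripped = stripped[len(prefix):].strip()
--                     break
--             if stripped: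
--                 current.append(stripped)
--         elif stripped:
--             current.append(stripped)
--         elif current:
--             tweets.append("\n".join(current).strip())
--             current = []
--
--     if current:
--         tweets.append("\n".join(current).strip())
--
--     return [{"text": t, "meme_id": None, "article_url": None} for t in tweets]
-- ===== SOURCE B (Python) =====
-- def _parse_tweets(text: str) -> list[dict]:
--     """Parse Claude's response into tweet dicts (lookahead-slicing decomposition)."""
--     lines = [s for s in (l.strip() for l in text.strip().split("\n")) if s]
--     n = len(lines)
--     # skip everything before the first TWEET: line
--     i = 0
--     while i < n and not lines[i].upper().startswith("TWEET:"):
--         i += 1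
--     tweets = []
--     while i < n:
--         # look ahead to the start of the next segment
--         j = i + 1
--         while j < n and not lines[j].upper().startswith("TWEET:"):
--             j += 1
--         body = lines[i + 1:j]
--         hdr = lines[i][6:].strip().strip('"').strip("'").strip("`")
--         txt = " ".join([hdr] + [l for l in body if not l.upper().startswith("MEME:")])
--         memes = [v.lower() for l in body if l.upper().startswith("MEME:")
--                  for v in [l[5:].strip()] if v and v.upper() != "NONE"]
--         tweets.append({"text": txt, "meme_id": memes[-1] if memes else None,
--                        "article_url": None})
--         i = j
--     if not tweets:
--         tweets = _parse_tweets_legacy(text)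
--     # cleaning pass with an early stop at two kept tweets
--     preamble = ("here are", "here's", "sure,", "sure!", "certainly")
--     out = []
--     for t in tweets:
--         if len(out) == 2:
--             break
--         txt = t["text"].strip('"').strip("'").strip("`").strip()
--         if len(txt) > 10 and not txt.lower().startswith(preamble):
--             t["text"] = txt
--             out.append(t)
--     return out
--
--
-- _MARKERS = ("1.", "1)", "2.", "2)", "Option 1", "Option 2",
--             "Tweet 1", "Tweet 2", "**Option", "**Tweet")
-- _PREFIXES = ("**Option 1:**", "**Option 2:**", "**Tweet 1:**", "**Tweet 2:**",
--              "Option 1:", "Option 2:", "Tweet 1:", "Tweet 2:",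
--              "Option 1.", "Option 2.", "Tweet 1.", "Tweet 2.",
--              "1)", "2)", "1.", "2.")
--
--
-- def _is_marker(s):
--     return s.startswith(_MARKERS)
--
--
-- def _split_parts(items, pred, keep_sep):
--     """Split items at elements satisfying pred; a separator starts the next part
--     (kept as its first element when keep_sep)."""
--     parts, cur = [], []
--     for x in items:
--         if pred(x):
--             parts.append(cur)
--             cur = [x] if keep_sep else []
--         else:
--             cur.append(x)
--     parts.append(cur)
--     return parts
--
--
-- def _block_content(b):
--     """Clean a block: strip the known prefix off a marker head, dropping it if empty."""
--     if b and _is_marker(b[0]):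
--         h = b[0]
--         for p in _PREFIXES:
--             if h.startswith(p):
--                 h = h[len(p):].strip()
--                 break
--         return ([h] if h else []) + b[1:]
--     return b
--
--
-- def _parse_tweets_legacy(text: str) -> list[dict]:
--     """Legacy fallback: staged splitting — paragraphs between blank lines, then
--     blocks before each marker line, then clean/join/filter."""
--     lines = [l.strip() for l in text.strip().split("\n")]
--     paras = _split_parts(lines, lambda l: not l, keep_sep=False)
--     blocks = [b for p in paras for b in _split_parts(p, _is_marker, keep_sep=True) if b]
--     texts = []
--     for b in blocks:
--         content = _block_content(b)
--         if content:
--             texts.append("\n".join(content).strip())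
--     return [{"text": t, "meme_id": None, "article_url": None} for t in texts]
-- ===== Notes on version B (the rewrite author's own statement) =====
-- stated objective: alternative
-- what changed: B replaces A's single-pass flush-on-boundary state machine by a lookahead-slicing parse: it pre-strips and drops blank lines, finds each TWEET: boundary by scanning ahead, and builds each tweet independently from its slice (text = join of the non-MEME body lines, meme = last valid entry of a comprehension); the legacy fallback becomes staged splitting (paragraphs between blanks, then blocks before marker lines, then clean/join/filter) instead of an accumulator loop, and the cleaning pass stops as soon as two tweets are kept.
import Mathlib
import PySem

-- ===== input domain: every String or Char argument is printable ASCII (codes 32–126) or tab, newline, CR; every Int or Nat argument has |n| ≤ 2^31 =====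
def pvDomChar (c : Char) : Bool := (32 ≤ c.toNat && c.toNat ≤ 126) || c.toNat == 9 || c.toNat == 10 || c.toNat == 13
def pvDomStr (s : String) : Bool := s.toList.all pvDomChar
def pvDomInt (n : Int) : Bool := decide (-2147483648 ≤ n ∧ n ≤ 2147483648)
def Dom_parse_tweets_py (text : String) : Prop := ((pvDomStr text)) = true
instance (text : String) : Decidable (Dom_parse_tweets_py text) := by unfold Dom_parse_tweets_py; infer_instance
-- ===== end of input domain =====

-- B parses by lookahead slicing (strip and drop blank lines, cut the line list at each
-- TWEET: boundary, build each tweet independently from its slice) instead of A's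
-- flush-on-boundary state machine; its legacy fallback is staged splitting.
-- Same return value as A everywhere (both mutate the dicts they return in place).

-- ----- helpers shared verbatim by both Python sources -----

-- .strip('"').strip("'").strip("`")
def pvStripQuotes (s : List Char) : List Char :=
  PySem.Chars.stripChars (PySem.Chars.stripChars (PySem.Chars.stripChars s ['"']) ['\'']) ['`']

-- {"text": t, "meme_id": m, "article_url": None}
def pvMkTweet (t : List Char) (m : Option (List Char)) : List (String × Option String) :=
  [("text", some (String.ofList t)), ("meme_id", m.map String.ofList), ("article_url", none)]

def pvPreamble : List (List Char) :=
  ["here are".toList, "here's".toList, "sure,".toList, "sure!".toList, "certainly".toList]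

-- t["text"]: both programs only build dicts whose "text" key holds a string; the
-- default branch is unreachable there (Python would raise only on a missing key).
def pvGetText (d : List (String × Option String)) : List Char :=
  match d.lookup "text" with | some (some s) => s.toList | _ => []

-- t["text"] = txt : overwrite in place on an existing key (key order preserved)
def pvSetText (d : List (String × Option String)) (txt : List Char) : List (String × Option String) :=
  d.map (fun kv => if kv.1 = "text" then ("text", some (String.ofList txt)) else kv)

-- stripped.upper().startswith("TWEET:") / ("MEME:")
def pvIsTweet (s : List Char) : Bool :=
  PySem.Chars.startswith (PySem.Chars.upper s) "TWEET:".toList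
def pvIsMeme (s : List Char) : Bool :=
  PySem.Chars.startswith (PySem.Chars.upper s) "MEME:".toList

def pvMarkers : List (List Char) :=
  ["1.".toList, "1)".toList, "2.".toList, "2)".toList, "Option 1".toList, "Option 2".toList,
   "Tweet 1".toList, "Tweet 2".toList, "**Option".toList, "**Tweet".toList]

def pvIsMarker (s : List Char) : Bool := pvMarkers.any (fun m => PySem.Chars.startswith s m)

def pvPrefixes : List (List Char) :=
  ["**Option 1:**".toList, "**Option 2:**".toList, "**Tweet 1:**".toList, "**Tweet 2:**".toList,
   "Option 1:".toList, "Option 2:".toList, "Tweet 1:".toList, "Tweet 2:".toList,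
   "Option 1.".toList, "Option 2.".toList, "Tweet 1.".toList, "Tweet 2.".toList,
   "1)".toList, "2)".toList, "1.".toList, "2.".toList]

-- the 'for prefix in …: if startswith: strip and break' loop of both legacy parsers
-- (stripped[len(prefix):] is s.drop p.length — exact, the start index is nonnegative)
def pvStripPrefix : List Char → List (List Char) → List Char
  | s, [] => s
  | s, p :: ps =>
    if PySem.Chars.startswith s p then PySem.Chars.strip (s.drop p.length)
    else pvStripPrefix s ps

-- "\n".join(current).strip()
def pvJoinBlock (b : List (List Char)) : List Char :=
  PySem.Chars.strip (PySem.Chars.join ['\n'] b)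

-- ===== PORT A =====

-- legacy loop body on the stripped line: state = (tweets, current)
def pvLegacyStepA' (st : List (List Char) × List (List Char)) (s : List Char) :
    List (List Char) × List (List Char) :=
  if s ≠ [] ∧ pvIsMarker s then
    let tws := if st.2 ≠ [] then st.1 ++ [pvJoinBlock st.2] else st.1
    let s' := pvStripPrefix s pvPrefixes
    (tws, if s' ≠ [] then [s'] else [])
  else if s ≠ [] then (st.1, st.2 ++ [s])
  else if st.2 ≠ [] then (st.1 ++ [pvJoinBlock st.2], []) else st

-- 'stripped = line.strip()' then the branches
def pvLegacyStepA (st : List (List Char) × List (List Char)) (line : List Char) :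
    List (List Char) × List (List Char) :=
  pvLegacyStepA' st (PySem.Chars.strip line)

def parse_tweets_legacy_py (text : String) : List (List (String × Option String)) :=
  let lines := PySem.Chars.splitOn (PySem.Chars.strip text.toList) ['\n']
  let st := lines.foldl pvLegacyStepA ([], [])
  let tws := if st.2 ≠ [] then st.1 ++ [pvJoinBlock st.2] else st.1
  tws.map (fun t => pvMkTweet t none)

-- main loop body on the stripped line: state = (tweets, current_text, current_meme);
-- stripped[6:]/[5:] = drop (nonnegative start, exact)
def pvStepA'
    (st : List (List (String × Option String)) × Option (List Char) × Option (List Char))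
    (s : List Char) :
    List (List (String × Option String)) × Option (List Char) × Option (List Char) :=
  if s = [] then st
  else if pvIsTweet s then
    let tws := match st.2.1 with
      | some t => st.1 ++ [pvMkTweet t st.2.2]
      | none => st.1
    (tws, some (pvStripQuotes (PySem.Chars.strip (s.drop 6))), (none : Option (List Char)))
  else if pvIsMeme s then
    let v := PySem.Chars.strip (s.drop 5)
    if PySem.Chars.upper v ≠ "NONE".toList ∧ v ≠ [] then (st.1, st.2.1, some (PySem.Chars.lower v))
    else st
  else match st.2.1 with
    | some t => (st.1, some (t ++ ' ' :: s), st.2.2)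
    | none => st

def pvStepA
    (st : List (List (String × Option String)) × Option (List Char) × Option (List Char))
    (line : List Char) :
    List (List (String × Option String)) × Option (List Char) × Option (List Char) :=
  pvStepA' st (PySem.Chars.strip line)

-- cleaning loop body (A appends to `cleaned`, then takes the first two)
def pvCleanStepA (acc : List (List (String × Option String))) (t : List (String × Option String)) :
    List (List (String × Option String)) :=
  let txt := PySem.Chars.strip (pvStripQuotes (pvGetText t))
  if txt ≠ [] ∧ txt.length > 10 then
    if pvPreamble.any (fun p => PySem.Chars.startswith (PySem.Chars.lower txt) p) then acc
    else acc ++ [pvSetText t txt]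
  else acc

def parse_tweets_py (text : String) : List (List (String × Option String)) :=
  let lines := PySem.Chars.splitOn (PySem.Chars.strip text.toList) ['\n']
  let st := lines.foldl pvStepA ([], none, none)
  let tweets := match st.2.1 with
    | some t => st.1 ++ [pvMkTweet t st.2.2]
    | none => st.1
  let tweets := if tweets = [] then parse_tweets_legacy_py text else tweets
  (tweets.foldl pvCleanStepA []).take 2

-- ===== PORT B =====

-- lines[i][6:].strip().strip('"').strip("'").strip("`")
def pvHdr (l : List Char) : List Char := pvStripQuotes (PySem.Chars.strip (l.drop 6))

-- one element of B's meme comprehension: lower(v) when l is a valid MEME: line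
def pvMemeVal (l : List Char) : Option (List Char) :=
  if pvIsMeme l then
    let v := PySem.Chars.strip (l.drop 5)
    if v ≠ [] ∧ PySem.Chars.upper v ≠ "NONE".toList then some (PySem.Chars.lower v) else none
  else none

-- B's initial skip loop: advance past everything before the first TWEET: line
def pvSkip : List (List Char) → List (List Char)
  | [] => []
  | l :: ls => if pvIsTweet l then l :: ls else pvSkip ls

-- B's lookahead scan: (body lines before the next TWEET:, rest from that TWEET:)
def pvSplitSeg : List (List Char) → List (List Char) × List (List Char)
  | [] => ([], [])
  | l :: ls => if pvIsTweet l then ([], l :: ls)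
               else ((l :: (pvSplitSeg ls).1), (pvSplitSeg ls).2)

lemma pvSplitSeg_len (ls : List (List Char)) : (pvSplitSeg ls).2.length ≤ ls.length := by
  induction ls with
  | nil => simp [pvSplitSeg]
  | cons l ls ih =>
    by_cases h : pvIsTweet l = true <;> simp [pvSplitSeg, h] <;> omega

-- B's outer loop: one tweet per iteration, built from its slice
def pvSegsB : List (List Char) → List (List Char × Option (List Char))
  | [] => []
  | l :: ls =>
    match h : pvSplitSeg ls with
    | (body, rest) =>
      (PySem.Chars.join [' '] (pvHdr l :: body.filter (fun c => !(pvIsMeme c))),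
       (body.filterMap pvMemeVal).getLast?) :: pvSegsB rest
  termination_by ls => ls.length
  decreasing_by
    have hlen := pvSplitSeg_len ls
    rw [h] at hlen
    exact Nat.lt_succ_of_le hlen

-- generic split helper _split_parts(items, pred, keep_sep): state = (parts, cur)
def pvSplitPartsStep (pred : List Char → Bool) (keepSep : Bool)
    (st : List (List (List Char)) × List (List Char)) (x : List Char) :
    List (List (List Char)) × List (List Char) :=
  if pred x then (st.1 ++ [st.2], if keepSep then [x] else []) else (st.1, st.2 ++ [x])

def pvSplitParts (items : List (List Char)) (pred : List Char → Bool) (keepSep : Bool) :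
    List (List (List Char)) :=
  let st := items.foldl (pvSplitPartsStep pred keepSep) ([], [])
  st.1 ++ [st.2]

-- _block_content: strip the known prefix off a marker head, dropping it if empty
def pvBlockContent (b : List (List Char)) : List (List Char) :=
  match b with
  | [] => b
  | h :: r =>
    if pvIsMarker h then
      (if pvStripPrefix h pvPrefixes ≠ [] then [pvStripPrefix h pvPrefixes] else []) ++ r
    else b

def parse_tweets_legacy_alt (text : String) : List (List (String × Option String)) :=
  let lines := (PySem.Chars.splitOn (PySem.Chars.strip text.toList) ['\n']).map PySem.Chars.strip
  let paras := pvSplitParts lines (fun l => l.isEmpty) false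
  let blocks := paras.flatMap (fun p => (pvSplitParts p pvIsMarker true).filter (fun b => b ≠ []))
  let texts := blocks.foldl
    (fun acc b => if pvBlockContent b ≠ [] then acc ++ [pvJoinBlock (pvBlockContent b)] else acc) []
  texts.map (fun t => pvMkTweet t none)

-- B's cleaning loop with the early break at two kept tweets
def pvCleanLoopB :
    List (List (String × Option String)) → List (List (String × Option String)) →
    List (List (String × Option String))
  | out, [] => out
  | out, t :: ts =>
    if out.length = 2 then out
    else
      let txt := PySem.Chars.strip (pvStripQuotes (pvGetText t))
      if txt.length > 10 ∧
          ¬ (pvPreamble.any (fun p => PySem.Chars.startswith (PySem.Chars.lower txt) p)) then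
        pvCleanLoopB (out ++ [pvSetText t txt]) ts
      else pvCleanLoopB out ts

def parse_tweets_py_alt (text : String) : List (List (String × Option String)) :=
  let lines := ((PySem.Chars.splitOn (PySem.Chars.strip text.toList) ['\n']).map
      PySem.Chars.strip).filter (fun l => l ≠ [])
  let tweets := (pvSegsB (pvSkip lines)).map (fun g => pvMkTweet g.1 g.2)
  let tweets := if tweets = [] then parse_tweets_legacy_alt text else tweets
  pvCleanLoopB [] tweets

-- ===== PRECONDITION & SPEC =====
def Spec_parse_tweets_py (text : String) (out : List (List (String × Option String))) : Prop := out = parse_tweets_py_alt text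
instance (text : String) (out : List (List (String × Option String))) : Decidable (Spec_parse_tweets_py text out) := by unfold Spec_parse_tweets_py; infer_instance

-- ===== CLAIM (what is proved, stated in full; the proofs are below) =====
def Claim_equal_parse_tweets_py : Prop := ∀ (text : String), Dom_parse_tweets_py text → Spec_parse_tweets_py text (parse_tweets_py text)

-- ===== LEMMAS AND PROOFS =====

-- ----- the main TWEET:/MEME: loop: A's state machine vs B's lookahead slicing -----

def pvFlushA (st : List (List (String × Option String)) × Option (List Char) × Option (List Char)) :
    List (List (String × Option String)) :=
  match st.2.1 with
  | some t => st.1 ++ [pvMkTweet t st.2.2]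
  | none => st.1

-- the body contribution to the running text: " " + c for each non-MEME body line
def pvFlat (body : List (List Char)) : List Char :=
  (body.filter (fun c => !(pvIsMeme c))).flatMap (fun c => ' ' :: c)

lemma pvSegsB_cons (l : List Char) (ls : List (List Char)) :
    pvSegsB (l :: ls) =
      (PySem.Chars.join [' '] (pvHdr l :: (pvSplitSeg ls).1.filter (fun c => !(pvIsMeme c))),
       ((pvSplitSeg ls).1.filterMap pvMemeVal).getLast?) :: pvSegsB (pvSplitSeg ls).2 := by
  cases hsp : pvSplitSeg ls with
  | mk body rest => simp [pvSegsB, hsp]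

lemma pvStepA'_nil (st : List (List (String × Option String)) × Option (List Char) × Option (List Char)) :
    pvStepA' st [] = st := by simp [pvStepA']

lemma foldl_stepA_map (ls : List (List Char))
    (st : List (List (String × Option String)) × Option (List Char) × Option (List Char)) :
    ls.foldl pvStepA st = (ls.map PySem.Chars.strip).foldl pvStepA' st := by
  rw [List.foldl_map]; rfl

lemma foldl_stepA'_filter (ls : List (List Char))
    (st : List (List (String × Option String)) × Option (List Char) × Option (List Char)) :
    ls.foldl pvStepA' st = (ls.filter (fun l => l ≠ [])).foldl pvStepA' st := by
  induction ls generalizing st with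
  | nil => rfl
  | cons l ls ih =>
    by_cases hl : l = []
    · simp [hl, pvStepA'_nil, ih]
    · simp [hl, ih]

lemma pvJoin_cons_flat (h : List Char) (cs : List (List Char)) :
    PySem.Chars.join [' '] (h :: cs) = h ++ cs.flatMap (fun c => ' ' :: c) := by
  induction cs generalizing h with
  | nil => simp [PySem.Chars.join_singleton]
  | cons c cs ih =>
    rw [PySem.Chars.join_cons_cons, ih c]
    simp

lemma pvOr_some_or {α : Type} (x : Option α) (v : α) (w : Option α) :
    (x.or (some v)).or w = x.or (some v) := by
  cases x <;> simp

lemma getLast?_cons_or {α : Type} (a : α) (l : List α) :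
    (a :: l).getLast? = l.getLast?.or (some a) := by
  induction l generalizing a with
  | nil => simp
  | cons b t ih => rw [List.getLast?_cons_cons, ih b, pvOr_some_or]

lemma pvMemeVal_of_not_meme (l : List Char) (h : pvIsMeme l = false) : pvMemeVal l = none := by
  simp [pvMemeVal, h]

lemma pvSegL2 (ls : List (List Char)) :
    ∀ (acc : List (List (String × Option String))) (t : List Char) (m : Option (List Char)),
    (∀ l ∈ ls, l ≠ []) →
    pvFlushA (ls.foldl pvStepA' (acc, some t, m)) =
      acc ++ (pvMkTweet (t ++ pvFlat (pvSplitSeg ls).1)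
               ((((pvSplitSeg ls).1.filterMap pvMemeVal).getLast?).or m))
          :: (pvSegsB (pvSplitSeg ls).2).map (fun g => pvMkTweet g.1 g.2) := by
  induction ls with
  | nil =>
    intro acc t m _
    simp [pvFlushA, pvSplitSeg, pvSegsB, pvFlat]
  | cons l ls ih =>
    intro acc t m hne
    have hl : l ≠ [] := hne l (by simp)
    have hne' : ∀ x ∈ ls, x ≠ [] := fun x hx => hne x (by simp [hx])
    rw [List.foldl_cons]
    by_cases ht : pvIsTweet l = true
    · have hstep : pvStepA' (acc, some t, m) l = (acc ++ [pvMkTweet t m], some (pvHdr l), none) := by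
        simp [pvStepA', hl, ht, pvHdr]
      rw [hstep, ih _ _ _ hne']
      rw [show pvSplitSeg (l :: ls) = ([], l :: ls) by simp [pvSplitSeg, ht]]
      rw [pvSegsB_cons]
      simp [pvFlat, pvJoin_cons_flat]
    · by_cases hm : pvIsMeme l = true
      · rw [show pvSplitSeg (l :: ls) = (l :: (pvSplitSeg ls).1, (pvSplitSeg ls).2) by
          simp [pvSplitSeg, ht]]
        by_cases h1 : PySem.Chars.strip (l.drop 5) = []
        · have hstep : pvStepA' (acc, some t, m) l = (acc, some t, m) := by
            simp [pvStepA', hl, ht, hm, h1]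
          have hval : pvMemeVal l = none := by simp [pvMemeVal, hm, h1]
          rw [hstep, ih _ _ _ hne']
          simp [pvFlat, hm, hval]
        · by_cases h2 : PySem.Chars.upper (PySem.Chars.strip (l.drop 5)) = ['N', 'O', 'N', 'E']
          · have hstep : pvStepA' (acc, some t, m) l = (acc, some t, m) := by
              simp [pvStepA', hl, ht, hm, h2]
            have hval : pvMemeVal l = none := by simp [pvMemeVal, hm, h1, h2]
            rw [hstep, ih _ _ _ hne']
            simp [pvFlat, hm, hval]
          · have hstep : pvStepA' (acc, some t, m) l =
                (acc, some t, some (PySem.Chars.lower (PySem.Chars.strip (l.drop 5)))) := by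
              simp [pvStepA', hl, ht, hm, h1, h2]
            have hval : pvMemeVal l =
                some (PySem.Chars.lower (PySem.Chars.strip (l.drop 5))) := by
              simp [pvMemeVal, hm, h1, h2]
            rw [hstep, ih _ _ _ hne']
            simp [pvFlat, hm, hval, List.filterMap_cons, getLast?_cons_or, pvOr_some_or]
      · have hstep : pvStepA' (acc, some t, m) l = (acc, some (t ++ ' ' :: l), m) := by
          simp [pvStepA', hl, ht, hm]
        rw [show pvSplitSeg (l :: ls) = (l :: (pvSplitSeg ls).1, (pvSplitSeg ls).2) by
          simp [pvSplitSeg, ht]]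
        have hval : pvMemeVal l = none := pvMemeVal_of_not_meme l (by simpa using hm)
        rw [hstep, ih _ _ _ hne']
        simp [pvFlat, hm, hval, List.append_assoc]

lemma pvSegL1 (ls : List (List Char)) :
    ∀ (acc : List (List (String × Option String))) (m : Option (List Char)),
    (∀ l ∈ ls, l ≠ []) →
    pvFlushA (ls.foldl pvStepA' (acc, none, m)) =
      acc ++ (pvSegsB (pvSkip ls)).map (fun g => pvMkTweet g.1 g.2) := by
  induction ls with
  | nil => intro acc m _; simp [pvFlushA, pvSkip, pvSegsB]
  | cons l ls ih =>
    intro acc m hne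
    have hl : l ≠ [] := hne l (by simp)
    have hne' : ∀ x ∈ ls, x ≠ [] := fun x hx => hne x (by simp [hx])
    rw [List.foldl_cons]
    by_cases ht : pvIsTweet l = true
    · have hstep : pvStepA' (acc, none, m) l = (acc, some (pvHdr l), none) := by
        simp [pvStepA', hl, ht, pvHdr]
      rw [hstep, pvSegL2 ls _ _ _ hne']
      rw [show pvSkip (l :: ls) = l :: ls by simp [pvSkip, ht]]
      rw [pvSegsB_cons]
      simp [pvFlat, pvJoin_cons_flat]
    · rw [show pvSkip (l :: ls) = pvSkip ls by simp [pvSkip, ht]]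
      by_cases hm : pvIsMeme l = true
      · by_cases h1 : PySem.Chars.strip (l.drop 5) = []
        · have hstep : pvStepA' (acc, none, m) l = (acc, none, m) := by
            simp [pvStepA', hl, ht, hm, h1]
          rw [hstep, ih _ _ hne']
        · by_cases h2 : PySem.Chars.upper (PySem.Chars.strip (l.drop 5)) = ['N', 'O', 'N', 'E']
          · have hstep : pvStepA' (acc, none, m) l = (acc, none, m) := by
              simp [pvStepA', hl, ht, hm, h2]
            rw [hstep, ih _ _ hne']
          · have hstep : pvStepA' (acc, none, m) l =
                (acc, none, some (PySem.Chars.lower (PySem.Chars.strip (l.drop 5)))) := by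
              simp [pvStepA', hl, ht, hm, h1, h2]
            rw [hstep, ih _ _ hne']
      · have hstep : pvStepA' (acc, none, m) l = (acc, none, m) := by
          simp [pvStepA', hl, ht, hm]
        rw [hstep, ih _ _ hne']

-- ----- the legacy parser: A's state machine vs B's staged splitting -----

def pvFlushT (cur : List (List Char)) : List (List Char) :=
  if cur ≠ [] then [pvJoinBlock cur] else []

def pvNewCur (s : List Char) : List (List Char) :=
  if pvStripPrefix s pvPrefixes ≠ [] then [pvStripPrefix s pvPrefixes] else []

-- recursive specification of A's legacy loop (texts still to be produced, given cur)
def pvLegSpec : List (List Char) → List (List Char) → List (List Char)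
  | cur, [] => pvFlushT cur
  | cur, s :: ls =>
    if s ≠ [] ∧ pvIsMarker s then pvFlushT cur ++ pvLegSpec (pvNewCur s) ls
    else if s ≠ [] then pvLegSpec (cur ++ [s]) ls
    else pvFlushT cur ++ pvLegSpec [] ls

def pvFinalLegA (st : List (List Char) × List (List Char)) : List (List Char) :=
  if st.2 ≠ [] then st.1 ++ [pvJoinBlock st.2] else st.1

-- recursive splitters mirroring B's two _split_parts stages: (first part, later parts)
def pvSdR : List (List Char) → List (List Char) × List (List (List Char))
  | [] => ([], [])
  | x :: xs => if x = [] then ([], (pvSdR xs).1 :: (pvSdR xs).2)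
               else (x :: (pvSdR xs).1, (pvSdR xs).2)

def pvSbR : List (List Char) → List (List Char) × List (List (List Char))
  | [] => ([], [])
  | x :: xs => if pvIsMarker x then ([], (x :: (pvSbR xs).1) :: (pvSbR xs).2)
               else (x :: (pvSbR xs).1, (pvSbR xs).2)

def pvParaTexts (p : List (List Char)) : List (List Char) :=
  pvFlushT ((pvSbR p).1) ++ ((pvSbR p).2).flatMap (fun b => pvFlushT (pvBlockContent b))

lemma foldl_legA_map (ls : List (List Char)) (st : List (List Char) × List (List Char)) :
    ls.foldl pvLegacyStepA st = (ls.map PySem.Chars.strip).foldl pvLegacyStepA' st := by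
  rw [List.foldl_map]; rfl

lemma pvLegA_spec (ls : List (List Char)) :
    ∀ (tws cur : List (List Char)),
    pvFinalLegA (ls.foldl pvLegacyStepA' (tws, cur)) = tws ++ pvLegSpec cur ls := by
  induction ls with
  | nil =>
    intro tws cur
    by_cases hc : cur = [] <;> simp [pvFinalLegA, pvLegSpec, pvFlushT, hc]
  | cons s ls ih =>
    intro tws cur
    rw [List.foldl_cons]
    by_cases hmk : s ≠ [] ∧ pvIsMarker s = true
    · have hstep : pvLegacyStepA' (tws, cur) s = (tws ++ pvFlushT cur, pvNewCur s) := by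
        by_cases hc : cur = [] <;> simp [pvLegacyStepA', hmk, pvFlushT, pvNewCur, hc]
      rw [hstep, ih, pvLegSpec, if_pos hmk, List.append_assoc]
    · by_cases hs : s = []
      · have hstep : pvLegacyStepA' (tws, cur) s = (tws ++ pvFlushT cur, []) := by
          by_cases hc : cur = [] <;> simp [pvLegacyStepA', hs, pvFlushT, hc]
        rw [hstep, ih, pvLegSpec, if_neg hmk, if_neg (by simp [hs]), List.append_assoc]
      · have hnm : pvIsMarker s = false := by
          cases h : pvIsMarker s
          · rfl
          · exact absurd ⟨hs, h⟩ hmk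
        have hstep : pvLegacyStepA' (tws, cur) s = (tws, cur ++ [s]) := by
          simp [pvLegacyStepA', hs, hnm]
        rw [hstep, ih, pvLegSpec, if_neg hmk, if_pos hs]

lemma pvBlockContent_marker (s : List Char) (c : List (List Char)) (h : pvIsMarker s = true) :
    pvBlockContent (s :: c) = pvNewCur s ++ c := by
  simp [pvBlockContent, pvNewCur, h]

lemma pvLegSpec_staged (ls : List (List Char)) :
    ∀ (cur : List (List Char)),
    pvLegSpec cur ls =
      pvFlushT (cur ++ (pvSbR (pvSdR ls).1).1)
      ++ ((pvSbR (pvSdR ls).1).2).flatMap (fun b => pvFlushT (pvBlockContent b))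
      ++ ((pvSdR ls).2).flatMap pvParaTexts := by
  induction ls with
  | nil => intro cur; simp [pvLegSpec, pvSdR, pvSbR]
  | cons s ls ih =>
    intro cur
    by_cases hmk : s ≠ [] ∧ pvIsMarker s = true
    · rw [pvLegSpec, if_pos hmk, ih]
      rw [show pvSdR (s :: ls) = (s :: (pvSdR ls).1, (pvSdR ls).2) by simp [pvSdR, hmk.1]]
      rw [show pvSbR (s :: (pvSdR ls).1) =
            ([], (s :: (pvSbR (pvSdR ls).1).1) :: (pvSbR (pvSdR ls).1).2) by
          simp [pvSbR, hmk.2]]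
      have hbc : ∀ c, pvBlockContent (s :: c) = pvNewCur s ++ c :=
        fun c => pvBlockContent_marker s c hmk.2
      simp only [hbc, pvFlushT, List.append_nil, List.nil_append, List.append_assoc]
      by_cases hc : cur = [] <;>
        by_cases hn : pvNewCur s = [] <;>
        by_cases hx : (pvSbR (pvSdR ls).1).1 = [] <;>
        simp [hc, hn, hx, hbc]
    · by_cases hs : s = []
      · rw [pvLegSpec, if_neg hmk, if_neg (by simp [hs]), ih]
        rw [show pvSdR (s :: ls) = ([], (pvSdR ls).1 :: (pvSdR ls).2) by simp [pvSdR, hs]]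
        simp [pvSbR, pvParaTexts, List.append_assoc]
      · have hnm : pvIsMarker s = false := by
          cases h : pvIsMarker s
          · rfl
          · exact absurd ⟨hs, h⟩ hmk
        rw [pvLegSpec, if_neg hmk, if_pos hs, ih]
        rw [show pvSdR (s :: ls) = (s :: (pvSdR ls).1, (pvSdR ls).2) by simp [pvSdR, hs]]
        rw [show pvSbR (s :: (pvSdR ls).1) =
              (s :: (pvSbR (pvSdR ls).1).1, (pvSbR (pvSdR ls).1).2) by simp [pvSbR, hnm]]
        simp [List.append_assoc]

lemma pvSd_fold (items : List (List Char)) :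
    ∀ (parts : List (List (List Char))) (cur : List (List Char)),
    (items.foldl (pvSplitPartsStep (fun l => l.isEmpty) false) (parts, cur)).1
      ++ [(items.foldl (pvSplitPartsStep (fun l => l.isEmpty) false) (parts, cur)).2]
    = parts ++ (cur ++ (pvSdR items).1) :: (pvSdR items).2 := by
  induction items with
  | nil => intro parts cur; simp [pvSdR]
  | cons x xs ih =>
    intro parts cur
    by_cases hx : x = []
    · simp only [List.foldl_cons, pvSplitPartsStep, hx, List.isEmpty_nil, if_true,
        Bool.false_eq_true, if_false, ih]
      simp [pvSdR]
    · have hxe : x.isEmpty = false := by simp [List.isEmpty_iff, hx]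
      simp only [List.foldl_cons, pvSplitPartsStep, hxe, Bool.false_eq_true, if_false, ih]
      simp [pvSdR, hx, List.append_assoc]

lemma pvSb_fold (items : List (List Char)) :
    ∀ (parts : List (List (List Char))) (cur : List (List Char)),
    (items.foldl (pvSplitPartsStep pvIsMarker true) (parts, cur)).1
      ++ [(items.foldl (pvSplitPartsStep pvIsMarker true) (parts, cur)).2]
    = parts ++ (cur ++ (pvSbR items).1) :: (pvSbR items).2 := by
  induction items with
  | nil => intro parts cur; simp [pvSbR]
  | cons x xs ih =>
    intro parts cur
    by_cases hx : pvIsMarker x = true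
    · simp only [List.foldl_cons, pvSplitPartsStep, hx, if_true, ih]
      simp [pvSbR, hx]
    · simp only [List.foldl_cons, pvSplitPartsStep, hx, Bool.false_eq_true, if_false, ih]
      simp [pvSbR, hx, List.append_assoc]

lemma pvSplitParts_sd (items : List (List Char)) :
    pvSplitParts items (fun l => l.isEmpty) false = (pvSdR items).1 :: (pvSdR items).2 := by
  have h := pvSd_fold items [] []
  simpa [pvSplitParts] using h

lemma pvSplitParts_sb (items : List (List Char)) :
    pvSplitParts items pvIsMarker true = (pvSbR items).1 :: (pvSbR items).2 := by
  have h := pvSb_fold items [] []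
  simpa [pvSplitParts] using h

lemma pvSbR_fst_content (p : List (List Char)) :
    pvBlockContent ((pvSbR p).1) = (pvSbR p).1 := by
  cases p with
  | nil => simp [pvSbR, pvBlockContent]
  | cons x xs =>
    by_cases hx : pvIsMarker x = true
    · simp [pvSbR, hx, pvBlockContent]
    · simp [pvSbR, hx, pvBlockContent]

lemma pvTextsFold (bs : List (List (List Char))) (acc : List (List Char)) :
    bs.foldl (fun acc b =>
      if pvBlockContent b ≠ [] then acc ++ [pvJoinBlock (pvBlockContent b)] else acc) acc
    = acc ++ bs.flatMap (fun b => pvFlushT (pvBlockContent b)) := by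
  induction bs generalizing acc with
  | nil => simp
  | cons b bs ih =>
    rw [List.foldl_cons, ih]
    by_cases hb : pvBlockContent b = [] <;> simp [pvFlushT, hb]

lemma pvFlatMap_filter_ne (bs : List (List (List Char))) :
    (bs.filter (fun b => b ≠ [])).flatMap (fun b => pvFlushT (pvBlockContent b))
    = bs.flatMap (fun b => pvFlushT (pvBlockContent b)) := by
  induction bs with
  | nil => rfl
  | cons b bs ih =>
    by_cases hb : b = []
    · have hcontrib : pvFlushT (pvBlockContent b) = [] := by
        subst hb; simp [pvBlockContent, pvFlushT]
      rw [List.filter_cons, if_neg (by simp [hb]), List.flatMap_cons, hcontrib,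
        List.nil_append, ih]
    · rw [List.filter_cons, if_pos (by simp [hb]), List.flatMap_cons, List.flatMap_cons, ih]

lemma pvParaTexts_of_chunks (p : List (List Char)) :
    ((pvSplitParts p pvIsMarker true).filter (fun b => b ≠ [])).flatMap
      (fun b => pvFlushT (pvBlockContent b)) = pvParaTexts p := by
  rw [pvSplitParts_sb, pvFlatMap_filter_ne]
  simp [pvParaTexts, pvSbR_fst_content]

lemma pvFlatMap_chunks (ps : List (List (List Char))) :
    (ps.flatMap (fun p => (pvSplitParts p pvIsMarker true).filter (fun b => b ≠ []))).flatMap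
      (fun b => pvFlushT (pvBlockContent b)) = ps.flatMap pvParaTexts := by
  induction ps with
  | nil => rfl
  | cons p ps ih =>
    rw [List.flatMap_cons, List.flatMap_append, ih, pvParaTexts_of_chunks, List.flatMap_cons]

lemma pvLegacy_eq (text : String) : parse_tweets_legacy_py text = parse_tweets_legacy_alt text := by
  have hA : parse_tweets_legacy_py text
      = (pvFinalLegA ((PySem.Chars.splitOn (PySem.Chars.strip text.toList) ['\n']).foldl
          pvLegacyStepA ([], []))).map (fun t => pvMkTweet t none) := rfl
  have hB : parse_tweets_legacy_alt text
      = (((pvSplitParts ((PySem.Chars.splitOn (PySem.Chars.strip text.toList) ['\n']).map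
            PySem.Chars.strip) (fun l => l.isEmpty) false).flatMap
              (fun p => (pvSplitParts p pvIsMarker true).filter (fun b => b ≠ []))).foldl
          (fun acc b =>
            if pvBlockContent b ≠ [] then acc ++ [pvJoinBlock (pvBlockContent b)] else acc)
          []).map (fun t => pvMkTweet t none) := rfl
  rw [hA, hB, foldl_legA_map, pvLegA_spec, pvLegSpec_staged, pvTextsFold, pvSplitParts_sd,
    List.flatMap_cons, List.flatMap_append, pvFlatMap_chunks, pvParaTexts_of_chunks]
  simp [pvParaTexts, List.append_assoc]

-- ----- the cleaning pass: A's fold-then-take vs B's early-stopping loop -----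

def pvCl (t : List (String × Option String)) : Option (List (String × Option String)) :=
  let txt := PySem.Chars.strip (pvStripQuotes (pvGetText t))
  if txt.length > 10 ∧
      ¬ (pvPreamble.any (fun p => PySem.Chars.startswith (PySem.Chars.lower txt) p)) then
    some (pvSetText t txt)
  else none

lemma pvCleanA_fold (ts : List (List (String × Option String)))
    (acc : List (List (String × Option String))) :
    ts.foldl pvCleanStepA acc = acc ++ ts.filterMap pvCl := by
  induction ts generalizing acc with
  | nil => simp
  | cons t ts ih =>
    have hstep : pvCleanStepA acc t = acc ++ (pvCl t).toList := by
      simp only [pvCleanStepA, pvCl]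
      by_cases h10 : (PySem.Chars.strip (pvStripQuotes (pvGetText t))).length > 10
      · have hne : PySem.Chars.strip (pvStripQuotes (pvGetText t)) ≠ [] := by
          intro hnil
          rw [hnil] at h10
          simp at h10
        by_cases hpre : (pvPreamble.any fun p =>
            PySem.Chars.startswith (PySem.Chars.lower
              (PySem.Chars.strip (pvStripQuotes (pvGetText t)))) p) = true <;>
          simp [h10, hne, hpre]
      · simp [h10]
    rw [List.foldl_cons, ih, hstep, List.filterMap_cons]
    cases pvCl t <;> simp

lemma pvCleanB_loop (ts : List (List (String × Option String)))
    (out : List (List (String × Option String))) (h : out.length ≤ 2) :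
    pvCleanLoopB out ts = (out ++ ts.filterMap pvCl).take 2 := by
  induction ts generalizing out with
  | nil => simpa [pvCleanLoopB] using (List.take_of_length_le h).symm
  | cons t ts ih =>
    rw [pvCleanLoopB]
    by_cases h2 : out.length = 2
    · rw [if_pos h2, List.take_append]
      simp [h2, List.take_of_length_le (le_of_eq h2)]
    · rw [if_neg h2]
      have hlt : out.length < 2 := lt_of_le_of_ne h h2
      by_cases hk : (PySem.Chars.strip (pvStripQuotes (pvGetText t))).length > 10 ∧
          ¬ (pvPreamble.any fun p =>
            PySem.Chars.startswith (PySem.Chars.lower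
              (PySem.Chars.strip (pvStripQuotes (pvGetText t)))) p) = true
      · have hcl : pvCl t = some (pvSetText t
            (PySem.Chars.strip (pvStripQuotes (pvGetText t)))) := by
          simp only [pvCl]
          rw [if_pos hk]
        rw [if_pos hk, ih _ (by simp; omega), List.filterMap_cons, hcl]
        simp only [List.append_assoc, List.singleton_append]
      · have hcl : pvCl t = none := by
          simp only [pvCl]
          rw [if_neg hk]
        rw [if_neg hk, ih _ h, List.filterMap_cons, hcl]

-- ===== VERDICT (by name: the statement is the Claim_ definition above) =====
theorem parse_tweets_py_spec : Claim_equal_parse_tweets_py := by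
  intro text _
  unfold Spec_parse_tweets_py
  have hmem : ∀ l ∈ (((PySem.Chars.splitOn (PySem.Chars.strip text.toList) ['\n']).map
      PySem.Chars.strip).filter (fun l => l ≠ [])), l ≠ [] := by
    intro l hl
    have := List.of_mem_filter hl
    simpa using this
  have hmain : pvFlushA (((PySem.Chars.splitOn (PySem.Chars.strip text.toList) ['\n']).foldl
        pvStepA ([], none, none)))
      = (pvSegsB (pvSkip (((PySem.Chars.splitOn (PySem.Chars.strip text.toList) ['\n']).map
          PySem.Chars.strip).filter (fun l => l ≠ [])))).map (fun g => pvMkTweet g.1 g.2) := by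
    rw [foldl_stepA_map, foldl_stepA'_filter]
    exact pvSegL1 _ _ _ hmem
  have hA : parse_tweets_py text
      = ((if pvFlushA ((PySem.Chars.splitOn (PySem.Chars.strip text.toList) ['\n']).foldl
              pvStepA ([], none, none)) = [] then parse_tweets_legacy_py text
          else pvFlushA ((PySem.Chars.splitOn (PySem.Chars.strip text.toList) ['\n']).foldl
              pvStepA ([], none, none))).foldl pvCleanStepA []).take 2 := rfl
  have hB : parse_tweets_py_alt text
      = pvCleanLoopB []
          (if (pvSegsB (pvSkip (((PySem.Chars.splitOn (PySem.Chars.strip text.toList) ['\n']).map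
                PySem.Chars.strip).filter (fun l => l ≠ [])))).map (fun g => pvMkTweet g.1 g.2) = []
           then parse_tweets_legacy_alt text
           else (pvSegsB (pvSkip (((PySem.Chars.splitOn (PySem.Chars.strip text.toList) ['\n']).map
                PySem.Chars.strip).filter (fun l => l ≠ [])))).map (fun g => pvMkTweet g.1 g.2)) := rfl
  rw [hA, hB, hmain, pvLegacy_eq, pvCleanA_fold, pvCleanB_loop _ _ (by simp)]
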